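-- pv_equiv track=rewrite | github.com/HarryG18/PythonAdventures | Reverse The String.py | special_reverse_string
-- ===== SOURCE A (Python) =====
-- def special_reverse_string(txt):
--     out = ""
--     reversedstring= txt[::-1].replace(" ","")
--     for char in list(txt):
--         if not char.isspace():
--             if char.isupper():
--                 out+= reversedstring[0].upper()
--             else:
--                 out+=reversedstring[0].lower()
--             reversedstring = reversedstring[1:]
--         else: out+=" "
--     return out
-- ===== SOURCE B (Python) =====
-- def special_reverse_string(txt):
--     # In-place two-pointer swap on a char buffer: walk i from the left and j from
--     # the right, skip whitespace on either side, and exchange each facing pair of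
--     # non-space characters while re-applying each position's original case.
--     chars = list(txt)
--     i, j = 0, len(chars) - 1
--     while i < j:
--         a, b = chars[i], chars[j]
--         if a.isspace():
--             i += 1
--         elif b.isspace():
--             j -= 1
--         else:
--             chars[i] = b.upper() if a.isupper() else b.lower()
--             chars[j] = a.upper() if b.isupper() else a.lower()
--             i += 1
--             j -= 1
--     return "".join(chars)
-- ===== Notes on version B (the rewrite author's own statement) =====
-- stated objective: faster
-- what changed: B is an in-place two-pointer swap: pointers walk inward from both ends of a char buffer, skip whitespace, and exchange each facing pair of non-space characters re-applying each position's original case, instead of A's left-to-right scan that builds a stripped reversed copy and consumes it by repeated string slicing and concatenation.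
-- intended difference: On inputs containing whitespace other than the plain space (tab, newline or CR), A writes a plain space at each such position and leaves the character inside the reversed pool so it leaks into letter positions, while B preserves each whitespace character in place and reverses only the non-whitespace characters, which is the intended behaviour. — e.g. on special_reverse_string("a\tb"): A returns "b \t", B returns "b\ta"
import Mathlib
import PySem

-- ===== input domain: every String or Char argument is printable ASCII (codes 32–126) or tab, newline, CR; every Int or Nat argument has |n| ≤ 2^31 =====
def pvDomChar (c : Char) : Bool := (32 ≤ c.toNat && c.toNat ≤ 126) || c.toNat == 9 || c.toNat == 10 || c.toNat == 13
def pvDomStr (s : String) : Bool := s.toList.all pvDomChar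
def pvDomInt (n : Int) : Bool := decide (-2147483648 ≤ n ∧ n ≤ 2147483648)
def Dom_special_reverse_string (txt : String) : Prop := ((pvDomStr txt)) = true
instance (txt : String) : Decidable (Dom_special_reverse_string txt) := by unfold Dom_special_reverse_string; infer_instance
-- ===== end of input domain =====

-- B replaces A's O(n^2) one-directional scan (string re-slicing/concatenation of a stripped
-- reversed copy) by an in-place two-pointer swap from both ends, O(n); on tab/newline/CR it keeps
-- the character in place (A writes ' ' there and lets the character leak into letter positions).

-- ===== PORT A =====
-- the for-loop of A: state (out, reversedstring); 'none' is Python's IndexError on reversedstring[0]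
-- (never reached: reversedstring is always long enough)
def srsLoopA : List Char → List Char → List Char → Option (List Char)
  | [], out, _rs => some out
  | c :: rest, out, rs =>
    if !(PySem.Chars.isspace c) then
      match PySem.List.pyGet? rs 0 with
      | none => none
      | some r =>
        srsLoopA rest
          (out ++ [if PySem.Chars.isupper c then PySem.Chars.upperChar r else PySem.Chars.lowerChar r])
          (PySem.List.slice rs (some 1) none)
    else srsLoopA rest (out ++ [' ']) rs

def special_reverse_string (txt : String) : String :=
  -- reversedstring = txt[::-1].replace(" ","")
  let reversedstring :=
    PySem.Chars.replace ((PySem.Chars.slice? txt.toList none none (-1)).getD []) [' '] []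
  match srsLoopA txt.toList [] reversedstring with
  | some out => String.ofList out
  | none => ""   -- Python raises IndexError here (unreachable)

-- ===== PORT B =====
-- chars[i] = b.upper() if a.isupper() else b.lower()
def srsCase (orig other : Char) : Char :=
  if PySem.Chars.isupper orig then PySem.Chars.upperChar other else PySem.Chars.lowerChar other

-- B's while-loop: two pointers i ≤ j into the buffer; fuel = buffer length bounds the number of
-- iterations (each step moves i up or j down, so length many steps always suffice — proved below)
def srsSwap : Nat → Nat → Nat → List Char → List Char
  | 0, _, _, cs => cs
  | fuel+1, i, j, cs =>
    if i < j then
      let a := cs.getD i ' '   -- in range whenever i < j < cs.length, as in Python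
      let b := cs.getD j ' '
      if PySem.Chars.isspace a then srsSwap fuel (i+1) j cs
      else if PySem.Chars.isspace b then srsSwap fuel i (j-1) cs
      else srsSwap fuel (i+1) (j-1) ((cs.set i (srsCase a b)).set j (srsCase b a))
    else cs

def special_reverse_string_alt (txt : String) : String :=
  let chars := txt.toList
  String.ofList (srsSwap chars.length 0 (chars.length - 1) chars)   -- "".join(chars)

-- ===== PRECONDITION & SPEC =====
-- On inputs containing whitespace other than the plain space (tab, newline or CR), A writes a
-- plain space at each such position and leaves the character inside the reversed pool so it leaks
-- into letter positions, while B preserves each whitespace character in place and reverses only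
-- the non-whitespace characters, which is the intended behaviour.
def D_special_reverse_string (txt : String) : Prop :=
  (txt.toList.any (fun c => PySem.Chars.isspace c && c != ' ')) = true
instance (txt : String) : Decidable (D_special_reverse_string txt) := by
  unfold D_special_reverse_string; infer_instance

def Spec_special_reverse_string (txt : String) (out : String) : Prop :=
  ¬ D_special_reverse_string txt → out = special_reverse_string_alt txt
instance (txt : String) (out : String) : Decidable (Spec_special_reverse_string txt out) := by
  unfold Spec_special_reverse_string; infer_instance

def pvDiffWitness_special_reverse_string : String := "a\tb"
def pvDiffWitnessOut_special_reverse_string : String × String := ("b \t", "b\ta")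

-- ===== CLAIM (what is proved, stated in full; the proofs are below) =====
def Claim_unchanged_special_reverse_string : Prop := ∀ (txt : String), Dom_special_reverse_string txt → Spec_special_reverse_string txt (special_reverse_string txt)
def Claim_changed_special_reverse_string : Prop := Dom_special_reverse_string (pvDiffWitness_special_reverse_string) ∧ D_special_reverse_string (pvDiffWitness_special_reverse_string) ∧ special_reverse_string (pvDiffWitness_special_reverse_string) = pvDiffWitnessOut_special_reverse_string.1 ∧ special_reverse_string_alt (pvDiffWitness_special_reverse_string) = pvDiffWitnessOut_special_reverse_string.2 ∧ pvDiffWitnessOut_special_reverse_string.1 ≠ pvDiffWitnessOut_special_reverse_string.2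

def Claim_exact_special_reverse_string : Prop := ∀ (txt : String), Dom_special_reverse_string txt → D_special_reverse_string txt → special_reverse_string txt ≠ special_reverse_string_alt txt

-- ===== LEMMAS AND PROOFS =====

-- the common functional target: map each character, consuming the pool of (reversed) non-space
-- characters at non-whitespace positions
def srsTgt : List Char → List Char → List Char
  | [], _ => []
  | c :: rest, pool =>
    if PySem.Chars.isspace c then c :: srsTgt rest pool
    else match pool with
      | [] => []          -- pool exhausted (never reached under the length side condition)
      | p :: ps => srsCase c p :: srsTgt rest ps

-- the two-pointer loop, re-expressed on the middle segment alone
def srsSeg : Nat → List Char → List Char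
  | 0, cs => cs
  | fuel+1, cs =>
    if 1 < cs.length then
      let a := cs.getD 0 ' '
      let b := cs.getD (cs.length - 1) ' '
      if PySem.Chars.isspace a then a :: srsSeg fuel cs.tail
      else if PySem.Chars.isspace b then srsSeg fuel cs.dropLast ++ [b]
      else srsCase a b :: srsSeg fuel cs.tail.dropLast ++ [srsCase b a]
    else cs

lemma isspace_space : PySem.Chars.isspace ' ' = true := by decide

-- an ASCII character re-cased after itself is itself
lemma srsCase_self_ascii : ∀ n, n < 127 → srsCase (Char.ofNat n) (Char.ofNat n) = Char.ofNat n := by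
  decide

lemma srsCase_self {c : Char} (h : pvDomChar c = true) : srsCase c c = c := by
  have hlt : c.toNat < 127 := by
    have h' : (((32 ≤ c.toNat ∧ c.toNat ≤ 126) ∨ c.toNat = 9) ∨ c.toNat = 10) ∨ c.toNat = 13 := by
      simpa [pvDomChar] using h
    omega
  have := srsCase_self_ascii c.toNat hlt
  rwa [Char.ofNat_toNat] at this

-- helper: read/write inside the middle segment of L ++ mid ++ R
lemma getD_middle (L mid R : List Char) (k : Nat) (h : k < mid.length) (d : Char) :
    (L ++ mid ++ R).getD (L.length + k) d = mid.getD k d := by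
  simp [List.getD_eq_getElem?_getD, List.getElem?_append_right, List.getElem?_append_left, h]

lemma set_middle (L mid R : List Char) (k : Nat) (h : k < mid.length) (x : Char) :
    (L ++ mid ++ R).set (L.length + k) x = L ++ mid.set k x ++ R := by
  rw [List.append_assoc, List.set_append_right _ _ (Nat.le_add_right _ _)]
  simp [List.set_append_left _ _ ?_, h]

-- the index-based two-pointer loop acts only on the middle segment
lemma srsSwap_eq_seg : ∀ (fuel : Nat) (L mid R : List Char),
    srsSwap fuel L.length (L.length + mid.length - 1) (L ++ mid ++ R) = L ++ srsSeg fuel mid ++ R := by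
  intro fuel
  induction fuel with
  | zero => intro L mid R; rfl
  | succ n ih =>
    intro L mid R
    by_cases hm : 1 < mid.length
    · -- mid = a :: (m ++ [b])
      have hmne : mid ≠ [] := by intro h; rw [h] at hm; simp at hm
      obtain ⟨a, t, rfl⟩ := List.exists_cons_of_ne_nil hmne
      have ht : t ≠ [] := by intro h; rw [h] at hm; simp at hm
      obtain ⟨m, b, rfl⟩ : ∃ m b, t = m ++ [b] :=
        ⟨t.dropLast, t.getLast ht, (List.dropLast_concat_getLast ht).symm⟩
      have hlen : (a :: (m ++ [b])).length = m.length + 2 := by simp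
      have hij : L.length < L.length + (a :: (m ++ [b])).length - 1 := by rw [hlen]; omega
      have hja : L.length + (a :: (m ++ [b])).length - 1 = L.length + (m.length + 1) := by
        rw [hlen]; omega
      have hga : (L ++ (a :: (m ++ [b])) ++ R).getD L.length ' ' = a := by
        have := getD_middle L (a :: (m ++ [b])) R 0 (by rw [hlen]; omega) ' '
        simpa using this
      have hgb : (L ++ (a :: (m ++ [b])) ++ R).getD (L.length + (m.length + 1)) ' ' = b := by
        have := getD_middle L (a :: (m ++ [b])) R (m.length + 1) (by rw [hlen]; omega) ' '
        rw [this]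
        simp [List.getD_eq_getElem?_getD]
      -- unfold one step of srsSwap
      rw [show (n + 1 : Nat) = n + 1 from rfl]
      simp only [srsSwap, hja, hga, hgb, if_pos (by omega : L.length < L.length + (m.length + 1))]
      -- unfold one step of srsSeg
      have hseg : srsSeg (n+1) (a :: (m ++ [b])) =
          if PySem.Chars.isspace a then a :: srsSeg n (m ++ [b])
          else if PySem.Chars.isspace b then srsSeg n (a :: m) ++ [b]
          else srsCase a b :: srsSeg n m ++ [srsCase b a] := by
        simp only [srsSeg, hlen]
        have h0 : (a :: (m ++ [b])).getD 0 ' ' = a := rfl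
        have h1 : (a :: (m ++ [b])).getD (m.length + 2 - 1) ' ' = b := by
          simp [List.getD_eq_getElem?_getD]
        rw [h0, h1]
        simp only [List.tail_cons]
        rw [show (a :: (m ++ [b])).dropLast = a :: m by
              rw [← List.cons_append]; exact List.dropLast_concat,
          show (m ++ [b]).dropLast = m from List.dropLast_concat,
          if_pos (show (1:Nat) < m.length + 2 by omega)]
      rw [hseg]
      by_cases hsa : PySem.Chars.isspace a = true
      · rw [if_pos hsa, if_pos hsa]
        have e1 : L ++ (a :: (m ++ [b])) ++ R = (L ++ [a]) ++ (m ++ [b]) ++ R := by simp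
        have e2 : L.length + 1 = (L ++ [a]).length := by simp
        have e3 : L.length + (m.length + 1) = (L ++ [a]).length + (m ++ [b]).length - 1 := by
          simp; omega
        rw [e1, e2, e3, ih (L ++ [a]) (m ++ [b]) R]
        simp
      · rw [if_neg hsa, if_neg hsa]
        by_cases hsb : PySem.Chars.isspace b = true
        · rw [if_pos hsb, if_pos hsb]
          have e1 : L ++ (a :: (m ++ [b])) ++ R = L ++ (a :: m) ++ ([b] ++ R) := by simp
          have e2 : L.length + (m.length + 1) - 1 = L.length + (a :: m).length - 1 := by
            simp
          rw [e1, e2, ih L (a :: m) ([b] ++ R)]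
          simp
        · rw [if_neg hsb, if_neg hsb]
          -- the swap writes position L.length and position L.length + m.length + 1
          have hset : ((L ++ (a :: (m ++ [b])) ++ R).set L.length (srsCase a b)).set
                (L.length + (m.length + 1)) (srsCase b a)
              = (L ++ [srsCase a b]) ++ m ++ ([srsCase b a] ++ R) := by
            have s1 : (L ++ (a :: (m ++ [b])) ++ R).set L.length (srsCase a b)
                = L ++ (srsCase a b :: (m ++ [b])) ++ R := by
              have := set_middle L (a :: (m ++ [b])) R 0 (by rw [hlen]; omega) (srsCase a b)
              simpa using this
            rw [s1]
            have s2 := set_middle L (srsCase a b :: (m ++ [b])) R (m.length + 1)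
              (by simp) (srsCase b a)
            rw [s2]
            have s3 : (srsCase a b :: (m ++ [b])).set (m.length + 1) (srsCase b a)
                = srsCase a b :: m ++ [srsCase b a] := by
              simp [List.set_cons_succ, List.set_append_right _ _ (le_refl m.length)]
            rw [s3]; simp
          rw [hset]
          have e2 : L.length + 1 = (L ++ [srsCase a b]).length := by simp
          have e3 : L.length + (m.length + 1) - 1 = (L ++ [srsCase a b]).length + m.length - 1 := by
            simp
          rw [e2, e3, ih (L ++ [srsCase a b]) m ([srsCase b a] ++ R)]
          simp
    · -- no iteration: i < j fails, and srsSeg returns mid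
      have h1 : ¬ L.length < L.length + mid.length - 1 := by omega
      simp only [srsSwap, if_neg h1, srsSeg, if_neg hm]

-- appending a trailing whitespace character commutes with srsTgt
lemma srsTgt_append_space : ∀ (xs pool : List Char) (b : Char),
    PySem.Chars.isspace b = true →
    pool.length = xs.countP (fun c => !PySem.Chars.isspace c) →
    srsTgt (xs ++ [b]) pool = srsTgt xs pool ++ [b] := by
  intro xs
  induction xs with
  | nil =>
    intro pool b hb hlen
    simp [srsTgt, hb]
  | cons c rest ih =>
    intro pool b hb hlen
    rw [List.countP_cons] at hlen
    by_cases hc : PySem.Chars.isspace c = true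
    · simp only [List.cons_append, srsTgt, hc, if_true]
      rw [ih pool b hb (by simp [hc] at hlen; omega)]
    · have hc' : PySem.Chars.isspace c = false := by simpa using hc
      cases pool with
      | nil => simp [hc'] at hlen
      | cons p ps =>
        simp only [List.cons_append, srsTgt, hc']
        rw [ih ps b hb (by simp [hc'] at hlen; omega)]
        rfl

-- appending a trailing non-space character consumes the last pool element
lemma srsTgt_append_pair : ∀ (xs pool : List Char) (b a : Char),
    PySem.Chars.isspace b = false →
    pool.length = xs.countP (fun c => !PySem.Chars.isspace c) →
    srsTgt (xs ++ [b]) (pool ++ [a]) = srsTgt xs pool ++ [srsCase b a] := by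
  intro xs
  induction xs with
  | nil =>
    intro pool b a hb hlen
    have : pool = [] := by simpa using hlen
    subst this
    simp [srsTgt, hb]
  | cons c rest ih =>
    intro pool b a hb hlen
    rw [List.countP_cons] at hlen
    by_cases hc : PySem.Chars.isspace c = true
    · simp only [List.cons_append, srsTgt, hc, if_true]
      rw [ih pool b a hb (by simp [hc] at hlen; omega)]
    · have hc' : PySem.Chars.isspace c = false := by simpa using hc
      cases pool with
      | nil => simp [hc'] at hlen
      | cons p ps =>
        simp only [List.cons_append, srsTgt, hc']
        rw [ih ps b a hb (by simp [hc'] at hlen; omega)]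
        rfl

-- the segment two-pointer loop computes srsTgt against the reversed non-space pool
lemma srsSeg_eq_tgt : ∀ (fuel : Nat) (mid : List Char), mid.length ≤ fuel →
    (∀ c ∈ mid, pvDomChar c = true) →
    srsSeg fuel mid = srsTgt mid ((mid.filter (fun c => !PySem.Chars.isspace c)).reverse) := by
  intro fuel
  induction fuel with
  | zero =>
    intro mid h _
    have : mid = [] := List.eq_nil_of_length_eq_zero (Nat.le_zero.mp h)
    subst this; rfl
  | succ n ih =>
    intro mid hlen hdom
    by_cases hm : 1 < mid.length
    · have hmne : mid ≠ [] := by intro h; rw [h] at hm; simp at hm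
      obtain ⟨a, t, rfl⟩ := List.exists_cons_of_ne_nil hmne
      have ht : t ≠ [] := by intro h; rw [h] at hm; simp at hm
      obtain ⟨m, b, rfl⟩ : ∃ m b, t = m ++ [b] :=
        ⟨t.dropLast, t.getLast ht, (List.dropLast_concat_getLast ht).symm⟩
      have hl2 : (a :: (m ++ [b])).length = m.length + 2 := by simp
      have hlm : m.length ≤ n := by simp at hlen; omega
      have hseg : srsSeg (n+1) (a :: (m ++ [b])) =
          if PySem.Chars.isspace a then a :: srsSeg n (m ++ [b])
          else if PySem.Chars.isspace b then srsSeg n (a :: m) ++ [b]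
          else srsCase a b :: srsSeg n m ++ [srsCase b a] := by
        simp only [srsSeg, hl2]
        have h0 : (a :: (m ++ [b])).getD 0 ' ' = a := rfl
        have h1 : (a :: (m ++ [b])).getD (m.length + 2 - 1) ' ' = b := by
          simp [List.getD_eq_getElem?_getD]
        rw [h0, h1]
        simp only [List.tail_cons]
        rw [show (a :: (m ++ [b])).dropLast = a :: m by
              rw [← List.cons_append]; exact List.dropLast_concat,
          show (m ++ [b]).dropLast = m from List.dropLast_concat,
          if_pos (show (1:Nat) < m.length + 2 by omega)]
      rw [hseg]
      by_cases hsa : PySem.Chars.isspace a = true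
      · rw [if_pos hsa]
        have hpool : ((a :: (m ++ [b])).filter (fun c => !PySem.Chars.isspace c)).reverse
            = ((m ++ [b]).filter (fun c => !PySem.Chars.isspace c)).reverse := by
          simp [List.filter_cons, hsa]
        rw [hpool, ih (m ++ [b]) (by simp; omega)
          (fun c hc => hdom c (List.mem_cons_of_mem _ hc))]
        have : srsTgt (a :: (m ++ [b])) ((m ++ [b]).filter (fun c => !PySem.Chars.isspace c)).reverse
            = a :: srsTgt (m ++ [b]) ((m ++ [b]).filter (fun c => !PySem.Chars.isspace c)).reverse := by
          simp [srsTgt, hsa]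
        rw [this]
      · have hsa' : PySem.Chars.isspace a = false := by simpa using hsa
        rw [if_neg hsa]
        by_cases hsb : PySem.Chars.isspace b = true
        · rw [if_pos hsb]
          have hpool : ((a :: (m ++ [b])).filter (fun c => !PySem.Chars.isspace c)).reverse
              = ((a :: m).filter (fun c => !PySem.Chars.isspace c)).reverse := by
            simp [List.filter_append, List.filter_cons, hsb]
          rw [hpool, ih (a :: m) (by simp; omega)
            (fun c hc => by
              rcases List.mem_cons.mp hc with h|h
              · exact hdom c (List.mem_cons.mpr (Or.inl h))
              · exact hdom c (List.mem_cons.mpr (Or.inr (List.mem_append_left _ h))))]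
          rw [← List.cons_append,
            srsTgt_append_space (a :: m) _ b hsb
              (by rw [List.length_reverse, List.countP_eq_length_filter])]
        · have hsb' : PySem.Chars.isspace b = false := by simpa using hsb
          rw [if_neg hsb]
          have hpool : ((a :: (m ++ [b])).filter (fun c => !PySem.Chars.isspace c)).reverse
              = b :: (((m.filter (fun c => !PySem.Chars.isspace c)).reverse) ++ [a]) := by
            simp [List.filter_append, hsa', hsb']
          rw [hpool]
          have hstep : srsTgt (a :: (m ++ [b]))
                (b :: (((m.filter (fun c => !PySem.Chars.isspace c)).reverse) ++ [a]))
              = srsCase a b :: srsTgt (m ++ [b])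
                (((m.filter (fun c => !PySem.Chars.isspace c)).reverse) ++ [a]) := by
            simp [srsTgt, hsa']
          rw [hstep, srsTgt_append_pair m _ b a hsb'
            (by rw [List.length_reverse, List.countP_eq_length_filter]),
            ih m hlm (fun c hc => hdom c (List.mem_cons_of_mem _ (List.mem_append_left _ hc)))]
          simp
    · -- mid is [] or a singleton
      rw [show srsSeg (n+1) mid = mid by simp only [srsSeg, if_neg hm]]
      cases mid with
      | nil => rfl
      | cons c t =>
        have ht0 : t = [] := by
          simp only [List.length_cons, not_lt] at hm
          exact List.eq_nil_of_length_eq_zero (by omega)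
        subst ht0
        by_cases hc : PySem.Chars.isspace c = true
        · simp [srsTgt, hc]
        · have hc' : PySem.Chars.isspace c = false := by simpa using hc
          simp [srsTgt, hc',
            srsCase_self (hdom c List.mem_cons_self)]

-- A's loop computes srsTgt too, when every whitespace character is a plain space
lemma srsLoopA_tgt : ∀ (l out pool : List Char),
    (∀ c ∈ l, PySem.Chars.isspace c = true → c = ' ') →
    pool.length = l.countP (fun c => !PySem.Chars.isspace c) →
    srsLoopA l out pool = some (out ++ srsTgt l pool) := by
  intro l
  induction l with
  | nil => intro out pool _ _; simp [srsLoopA, srsTgt]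
  | cons c rest ih =>
    intro out pool h hlen
    rw [List.countP_cons] at hlen
    by_cases hs : PySem.Chars.isspace c = true
    · have hc : c = ' ' := h c List.mem_cons_self hs
      subst hc
      rw [show srsLoopA (' ' :: rest) out pool = srsLoopA rest (out ++ [' ']) pool by
        simp [srsLoopA, isspace_space]]
      rw [ih (out ++ [' ']) pool (fun x hx => h x (List.mem_cons_of_mem _ hx))
        (by simp [isspace_space] at hlen ⊢; omega)]
      simp [srsTgt, isspace_space]
    · have hs' : PySem.Chars.isspace c = false := by simpa using hs
      cases pool with
      | nil => simp [hs'] at hlen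
      | cons p ps =>
        rw [show srsLoopA (c :: rest) out (p :: ps)
            = srsLoopA rest (out ++ [srsCase c p]) ps by
          simp [srsLoopA, hs', srsCase, PySem.List.pyGet?, PySem.List.pyIdx?,
            PySem.List.slice_from_one]]
        rw [ih (out ++ [srsCase c p]) ps (fun x hx => h x (List.mem_cons_of_mem _ hx))
          (by simp [hs'] at hlen ⊢; omega)]
        simp [srsTgt, hs']

-- .replace(" ", "") is the filter dropping spaces
lemma replace_go_space (fuel : Nat) : ∀ (l acc : List Char), l.length ≤ fuel →
    PySem.Chars.replace.go [' '] [] fuel l acc = acc.reverse ++ l.filter (fun c => c ≠ ' ') := by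
  induction fuel with
  | zero =>
    intro l acc h
    have : l = [] := List.eq_nil_of_length_eq_zero (Nat.le_zero.mp h)
    subst this; simp [PySem.Chars.replace.go]
  | succ n ih =>
    intro l acc h
    cases l with
    | nil => simp [PySem.Chars.replace.go]
    | cons c t =>
      simp only [PySem.Chars.replace.go]
      by_cases hc : c = ' '
      · subst hc
        have hp : [' '].isPrefixOf (' ' :: t) = true := by simp [List.isPrefixOf]
        rw [if_pos hp]
        simp only [List.length_cons] at h
        simpa using ih t acc (by omega)
      · have hp : [' '].isPrefixOf (c :: t) = false := by
          simp [List.isPrefixOf]; exact fun h' => hc h'.symm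
        rw [if_neg (by simp [hp])]
        simp only [List.length_cons] at h
        rw [ih t (c :: acc) (by omega)]
        simp [hc]

lemma replace_space (l : List Char) :
    PySem.Chars.replace l [' '] [] = l.filter (fun c => c ≠ ' ') := by
  have := replace_go_space l.length l [] le_rfl
  simpa [PySem.Chars.replace] using this

lemma not_D_space {txt : String} (hD : ¬ D_special_reverse_string txt) :
    ∀ c ∈ txt.toList, PySem.Chars.isspace c = true → c = ' ' := by
  intro c hc hs
  by_contra hne
  apply hD
  simp only [D_special_reverse_string, List.any_eq_true]
  exact ⟨c, hc, by simp [hs, hne]⟩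

-- A's stripped reversed copy is the reversed non-whitespace pool when all whitespace is ' '
lemma poolA_eq {txt : String} (h : ∀ c ∈ txt.toList, PySem.Chars.isspace c = true → c = ' ') :
    PySem.Chars.replace ((PySem.Chars.slice? txt.toList none none (-1)).getD []) [' '] []
      = (txt.toList.filter (fun c => !PySem.Chars.isspace c)).reverse := by
  rw [PySem.Chars.slice?_eq_listSlice?, PySem.List.slice?_none_none_neg_one, Option.getD_some,
    replace_space, List.filter_reverse]
  congr 1
  apply List.filter_congr
  intro x hx
  by_cases hs : PySem.Chars.isspace x = true
  · have hx' := h x hx hs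
    subst hx'
    simp [isspace_space]
  · have hs' : PySem.Chars.isspace x = false := by simpa using hs
    have hxne : x ≠ ' ' := by rintro rfl; rw [isspace_space] at hs'; cases hs'
    simp [hxne, hs']

-- B's whole-buffer loop, in closed form
lemma alt_eq_tgt (txt : String) (hdom : ∀ c ∈ txt.toList, pvDomChar c = true) :
    special_reverse_string_alt txt
      = String.ofList (srsTgt txt.toList
          ((txt.toList.filter (fun c => !PySem.Chars.isspace c)).reverse)) := by
  unfold special_reverse_string_alt
  show String.ofList (srsSwap txt.toList.length 0 (txt.toList.length - 1) txt.toList) = _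
  have hb := srsSwap_eq_seg txt.toList.length [] txt.toList []
  simp only [List.length_nil, Nat.zero_add, List.nil_append, List.append_nil] at hb
  rw [hb, srsSeg_eq_tgt txt.toList.length txt.toList le_rfl hdom]

-- shape of A's loop output: at every whitespace position it wrote ' '
lemma loopA_shape : ∀ (l pool out r : List Char), srsLoopA l out pool = some r →
    ∃ t, r = out ++ t ∧ t.length = l.length ∧
      ∀ i, (h : i < l.length) → PySem.Chars.isspace l[i] = true → t[i]? = some ' ' := by
  intro l
  induction l with
  | nil =>
    intro pool out r hr
    refine ⟨[], ?_, rfl, by intro i h; simp at h⟩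
    simpa [srsLoopA] using hr.symm
  | cons c rest ih =>
    intro pool out r hr
    by_cases hs : PySem.Chars.isspace c = true
    · rw [show srsLoopA (c :: rest) out pool = srsLoopA rest (out ++ [' ']) pool by
        simp [srsLoopA, hs]] at hr
      obtain ⟨t, ht, hlen, hws⟩ := ih pool (out ++ [' ']) r hr
      refine ⟨' ' :: t, by simpa using ht, by simpa using hlen, ?_⟩
      intro i h hsp
      cases i with
      | zero => rfl
      | succ j => simpa using hws j (by simpa using h) (by simpa using hsp)
    · have hs' : PySem.Chars.isspace c = false := by simpa using hs
      cases pool with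
      | nil => simp [srsLoopA, hs', PySem.List.pyGet?, PySem.List.pyIdx?] at hr
      | cons p pool' =>
        rw [show srsLoopA (c :: rest) out (p :: pool')
            = srsLoopA rest
                (out ++ [if PySem.Chars.isupper c then PySem.Chars.upperChar p else PySem.Chars.lowerChar p])
                pool' by
          simp [srsLoopA, hs', PySem.List.pyGet?, PySem.List.pyIdx?, PySem.List.slice_from_one]] at hr
        obtain ⟨t, ht, hlen, hws⟩ := ih pool' _ r hr
        refine ⟨_ :: t, by simpa using ht, by simpa using hlen, ?_⟩
        intro i h hsp
        cases i with
        | zero => simp at hsp; rw [hsp] at hs'; cases hs'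
        | succ j => simpa using hws j (by simpa using h) (by simpa using hsp)

-- A's loop returns a value when the pool is long enough
lemma loopA_total : ∀ (l pool out : List Char),
    l.countP (fun c => !PySem.Chars.isspace c) ≤ pool.length →
    ∃ r, srsLoopA l out pool = some r := by
  intro l
  induction l with
  | nil => intro pool out _; exact ⟨out, rfl⟩
  | cons c rest ih =>
    intro pool out h
    rw [List.countP_cons] at h
    by_cases hs : PySem.Chars.isspace c = true
    · obtain ⟨r, hr⟩ := ih pool (out ++ [' ']) (by simp [hs] at h; omega)
      exact ⟨r, by simp [srsLoopA, hs, hr]⟩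
    · have hs' : PySem.Chars.isspace c = false := by simpa using hs
      simp only [hs', Bool.not_false] at h
      cases pool with
      | nil => simp at h
      | cons p pool' =>
        obtain ⟨r, hr⟩ := ih pool' _ (by simp at h ⊢; omega)
        refine ⟨r, ?_⟩
        rw [show srsLoopA (c :: rest) out (p :: pool')
            = srsLoopA rest
                (out ++ [if PySem.Chars.isupper c then PySem.Chars.upperChar p else PySem.Chars.lowerChar p])
                pool' by
          simp [srsLoopA, hs', PySem.List.pyGet?, PySem.List.pyIdx?, PySem.List.slice_from_one]]
        exact hr

-- srsTgt keeps every whitespace character in place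
lemma srsTgt_ws : ∀ (l pool : List Char),
    pool.length = l.countP (fun c => !PySem.Chars.isspace c) →
    ∀ i, (h : i < l.length) → PySem.Chars.isspace l[i] = true →
      (srsTgt l pool)[i]? = some l[i] := by
  intro l
  induction l with
  | nil => intro pool _ i h; simp at h
  | cons c rest ih =>
    intro pool hlen i h hsp
    rw [List.countP_cons] at hlen
    by_cases hs : PySem.Chars.isspace c = true
    · simp only [srsTgt, hs, if_true]
      cases i with
      | zero => rfl
      | succ j =>
        simpa using ih pool (by simp [hs] at hlen ⊢; omega) j (by simpa using h)
          (by simpa using hsp)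
    · have hs' : PySem.Chars.isspace c = false := by simpa using hs
      cases pool with
      | nil => simp [hs'] at hlen
      | cons p ps =>
        simp only [srsTgt, hs']
        cases i with
        | zero => simp at hsp; rw [hsp] at hs'; cases hs'
        | succ j =>
          simpa using ih ps (by simp [hs'] at hlen ⊢; omega) j (by simpa using h)
            (by simpa using hsp)

-- ===== VERDICT (by name: the statement is the Claim_ definition above) =====
theorem special_reverse_string_spec : Claim_unchanged_special_reverse_string := by
  intro txt hdom hD
  have h := not_D_space hD
  have hdom' : ∀ c ∈ txt.toList, pvDomChar c = true := by
    intro c hc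
    have := hdom
    simp only [Dom_special_reverse_string, pvDomStr, List.all_eq_true] at this
    exact this c hc
  show special_reverse_string txt = special_reverse_string_alt txt
  have hA : special_reverse_string txt = String.ofList (srsTgt txt.toList
      ((txt.toList.filter (fun c => !PySem.Chars.isspace c)).reverse)) := by
    unfold special_reverse_string
    simp only [poolA_eq h,
      srsLoopA_tgt txt.toList [] _ h (by rw [List.length_reverse, List.countP_eq_length_filter]),
      List.nil_append]
  rw [hA, alt_eq_tgt txt hdom']

theorem special_reverse_string_changed : Claim_changed_special_reverse_string := by
  unfold Claim_changed_special_reverse_string; decide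

theorem special_reverse_string_tight : Claim_exact_special_reverse_string := by
  intro txt hdom hD hEq
  obtain ⟨c, hc, hcprop⟩ := List.any_eq_true.mp hD
  have hcp : PySem.Chars.isspace c = true ∧ c ≠ ' ' := by simpa using hcprop
  have hdom' : ∀ x ∈ txt.toList, pvDomChar x = true := by
    intro x hx
    simp only [Dom_special_reverse_string, pvDomStr, List.all_eq_true] at hdom
    exact hdom x hx
  obtain ⟨i, hi, hgi⟩ := List.mem_iff_getElem.mp hc
  set l := txt.toList with hl
  -- A returns a value: its pool is long enough
  have hmono : l.countP (fun c => !PySem.Chars.isspace c) ≤ l.countP (fun c => decide (c ≠ ' ')) :=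
    List.countP_mono_left (fun x _ hx => by
      simp only [decide_eq_true_eq]
      rintro rfl
      rw [isspace_space] at hx; cases hx)
  have hAlen : (PySem.Chars.replace ((PySem.Chars.slice? l none none (-1)).getD []) [' '] []).length
      = l.countP (fun c => decide (c ≠ ' ')) := by
    rw [PySem.Chars.slice?_eq_listSlice?, PySem.List.slice?_none_none_neg_one, Option.getD_some,
      replace_space, List.filter_reverse, List.length_reverse, List.countP_eq_length_filter]
  obtain ⟨rA, hrA⟩ := loopA_total l _ [] (by rw [hAlen]; exact hmono)
  obtain ⟨tA, htA, htAlen, htAws⟩ := loopA_shape l _ [] rA hrA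
  simp only [List.nil_append] at htA
  subst htA
  clear htAlen
  -- B's output is srsTgt
  have hB : special_reverse_string_alt txt
      = String.ofList (srsTgt l ((l.filter (fun c => !PySem.Chars.isspace c)).reverse)) := by
    rw [alt_eq_tgt txt hdom']
  have h1 : special_reverse_string txt = String.ofList rA := by
    unfold special_reverse_string
    rw [← hl]
    simp only [hrA]
  have hout : rA = srsTgt l ((l.filter (fun c => !PySem.Chars.isspace c)).reverse) := by
    have := congrArg String.toList (h1 ▸ hB ▸ hEq)
    simpa using this
  have hA_i : rA[i]? = some ' ' := htAws i hi (by rw [hgi]; exact hcp.1)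
  have hB_i : (srsTgt l ((l.filter (fun c => !PySem.Chars.isspace c)).reverse))[i]? = some l[i] :=
    srsTgt_ws l _ (by rw [List.length_reverse, List.countP_eq_length_filter]) i hi
      (by rw [hgi]; exact hcp.1)
  rw [hout, hB_i] at hA_i
  rw [hgi] at hA_i
  exact hcp.2 (Option.some.inj hA_i)
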